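-- pv_equiv track=rewrite | github.com/simonfranckx/python-code-reeks0-5 | honkbal.py | slag
-- ===== SOURCE A (Python) =====
-- def slag(slagen,bezet=[]):
--     punten=0
--     erna=[]
--     if slagen <= 3:
--         if slagen!=0:
--             erna.append(slagen)
--     else:
--         punten += 1
--     for getal in bezet:
--         plaats=getal+slagen
--         if plaats>3:
--             punten+=1
--         elif plaats!=0:
--             erna.append(plaats)
--         erna.sort()
--         list(set(erna))
--     return(punten,erna)
-- ===== SOURCE B (Python) =====
-- def slag(slagen, bezet=[]):
--     # Sort the occupied bases (batter = base 0) once; advancing by `slagen` is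
--     # monotone, so a binary search for the last base that stays on the field
--     # splits the sorted list into "still on base" prefix and "scored" suffix.
--     bases = sorted([0] + bezet)
--     t = 3 - slagen          # a runner on base b scores iff b > t
--     lo, hi = 0, len(bases)
--     while lo < hi:
--         mid = (lo + hi) // 2
--         if bases[mid] <= t:
--             lo = mid + 1
--         else:
--             hi = mid
--     erna = [b + slagen for b in bases[:lo] if b + slagen != 0]
--     return (len(bases) - lo, erna)
-- ===== Notes on version B (the rewrite author's own statement) =====
-- stated objective: faster
-- what changed: B sorts the input bases once (batter added as base 0), finds the scoring boundary with a hand-rolled binary search and slices: the points are the length of the scored suffix and the remaining bases come out already in order, whereas A classifies each runner in a loop and re-sorts the growing result list in every iteration.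
import Mathlib
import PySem

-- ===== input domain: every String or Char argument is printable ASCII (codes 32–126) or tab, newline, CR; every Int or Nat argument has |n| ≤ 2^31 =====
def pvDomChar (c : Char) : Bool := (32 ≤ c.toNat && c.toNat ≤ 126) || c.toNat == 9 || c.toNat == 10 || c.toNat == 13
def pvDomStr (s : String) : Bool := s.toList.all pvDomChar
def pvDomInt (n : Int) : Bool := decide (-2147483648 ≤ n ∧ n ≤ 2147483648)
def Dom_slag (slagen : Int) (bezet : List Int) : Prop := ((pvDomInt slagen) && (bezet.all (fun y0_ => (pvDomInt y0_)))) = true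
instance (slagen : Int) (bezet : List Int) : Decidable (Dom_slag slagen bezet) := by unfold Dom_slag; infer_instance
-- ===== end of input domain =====

-- B sorts the input bases once (batter = base 0), binary-searches the scoring boundary and
-- slices, so the remaining bases come out already sorted (A re-sorts its result list in every
-- loop iteration): asymptotically faster, same results.


-- ===== PORT A =====
-- one iteration of A's for-loop: classify plaats, then erna.sort() (list(set(erna)) is discarded)
def slagStep (slagen : Int) (st : Int × List Int) (getal : Int) : Int × List Int :=
  let plaats := getal + slagen
  let st' := if plaats > 3 then (st.1 + 1, st.2)
             else if plaats ≠ 0 then (st.1, st.2 ++ [plaats])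
             else st
  (st'.1, PySem.List.sorted st'.2 (fun x => x) false)

def slag (slagen : Int) (bezet : List Int) : Int × List Int :=
  let punten : Int := 0
  let erna : List Int := []
  let st := if slagen ≤ 3 then
              (if slagen ≠ 0 then (punten, erna ++ [slagen]) else (punten, erna))
            else (punten + 1, erna)
  bezet.foldl (slagStep slagen) st

-- ===== PORT B =====
-- Source B's hand-written bisect loop, verbatim: while lo < hi: mid = (lo+hi)//2; …
-- (bases[mid] is ported as pyGetD with default 0: inside the loop 0 ≤ lo ≤ mid < hi ≤ len,
--  so the index is always in range, exactly as in the Python)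
def slagBisect (bases : List Int) (t : Int) (lo hi : Int) : Int :=
  if h : lo < hi then
    let mid := PySem.Int.floordiv (lo + hi) 2
    if PySem.List.pyGetD bases mid 0 ≤ t then slagBisect bases t (mid + 1) hi
    else slagBisect bases t lo mid
  else lo
termination_by (hi - lo).toNat
decreasing_by
  · have h1 := PySem.Int.floordiv_two_mid_bounds (le_of_lt h)
    omega
  · have h2 : PySem.Int.floordiv (lo + hi) 2 < hi :=
      (PySem.Int.floordiv_lt_iff_lt_mul (by omega)).mpr (by omega)
    omega

def slag_alt (slagen : Int) (bezet : List Int) : Int × List Int :=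
  let bases := PySem.List.sorted (0 :: bezet) (fun x => x) false
  let t := 3 - slagen
  let lo := slagBisect bases t 0 (bases.length : Int)
  let erna := ((PySem.List.slice bases none (some lo)).filter
                 (fun b => decide (b + slagen ≠ 0))).map (fun b => b + slagen)
  ((bases.length : Int) - lo, erna)

-- ===== PRECONDITION & SPEC =====
def Spec_slag (slagen : Int) (bezet : List Int) (out : Int × List Int) : Prop := out = slag_alt slagen bezet
instance (slagen : Int) (bezet : List Int) (out : Int × List Int) : Decidable (Spec_slag slagen bezet out) := by unfold Spec_slag; infer_instance

-- ===== CLAIM (what is proved, stated in full; the proofs are below) =====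
def Claim_equal_slag : Prop := ∀ (slagen : Int) (bezet : List Int), Dom_slag slagen bezet → Spec_slag slagen bezet (slag slagen bezet)

-- ===== LEMMAS AND PROOFS =====

-- sorting again after appending to an already-sorted list = sorting the whole list once
lemma sorted_sorted_append (e : List Int) (xs : List Int) :
    PySem.List.sorted (PySem.List.sorted e (fun x => x) false ++ xs) (fun x => x) false
      = PySem.List.sorted (e ++ xs) (fun x => x) false := by
  rw [PySem.List.sorted_id_eq_sorted_id_iff_perm]
  exact (PySem.List.sorted_perm e (fun x => x) false).append_right xs

-- A-side loop invariant: A's fold from a sorted state = count the >3 hits, collect the rest, sort once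
lemma slag_loop (slagen : Int) (bezet : List Int) : ∀ (p : Int) (e : List Int),
    bezet.foldl (slagStep slagen) (p, PySem.List.sorted e (fun x => x) false)
      = (p + (((bezet.map (fun b => b + slagen)).filter (fun q => q > 3)).length : Int),
         PySem.List.sorted (e ++ (bezet.map (fun b => b + slagen)).filter (fun q => q ≤ 3 && q ≠ 0))
           (fun x => x) false) := by
  induction bezet with
  | nil => intro p e; simp
  | cons g rest ih =>
    intro p e
    simp only [List.foldl_cons, List.map_cons, List.filter_cons]
    by_cases h3 : g + slagen > 3
    · have : slagStep slagen (p, PySem.List.sorted e (fun x => x) false) g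
          = (p + 1, PySem.List.sorted e (fun x => x) false) := by
        simp [slagStep, h3, PySem.List.sorted_sorted]
      rw [this, ih (p + 1) e]
      have h3' : ¬ (g + slagen ≤ 3) := by omega
      simp [h3, h3']
      omega
    · have h3' : g + slagen ≤ 3 := by omega
      by_cases h0 : g + slagen = 0
      · have : slagStep slagen (p, PySem.List.sorted e (fun x => x) false) g
            = (p, PySem.List.sorted e (fun x => x) false) := by
          simp [slagStep, h0, PySem.List.sorted_sorted]
        rw [this, ih p e]
        simp [h0]
      · have : slagStep slagen (p, PySem.List.sorted e (fun x => x) false) g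
            = (p, PySem.List.sorted (e ++ [g + slagen]) (fun x => x) false) := by
          simp [slagStep, h3, h0, sorted_sorted_append]
        rw [this, ih p (e ++ [g + slagen])]
        simp [h3, h3', h0]

-- A in closed form: count of scored positions, sorted list of kept positions, over batter∷runners
lemma slag_closed (slagen : Int) (bezet : List Int) :
    slag slagen bezet
      = (((((0 :: bezet).map (fun b => b + slagen)).filter (fun p => p > 3)).length : Int),
         PySem.List.sorted (((0 :: bezet).map (fun b => b + slagen)).filter
           (fun p => p ≤ 3 && p ≠ 0)) (fun x => x) false) := by
  unfold slag
  simp only [List.map_cons, List.filter_cons, zero_add]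
  have hnil : PySem.List.sorted ([] : List Int) (fun x => x) false = [] := rfl
  have hone : PySem.List.sorted [slagen] (fun x => x) false = [slagen] := rfl
  by_cases h3 : slagen ≤ 3
  · by_cases h0 : slagen = 0
    · have h := slag_loop slagen bezet 0 []
      rw [hnil] at h
      rw [if_pos h3, if_neg (by simp [h0]), h]
      simp [h0]
    · have h := slag_loop slagen bezet 0 [slagen]
      rw [hone] at h
      rw [if_pos h3, if_pos h0]
      simp only [List.nil_append]
      rw [h]
      have c1 : (decide (slagen > 3)) = false := by simp; omega
      simp [c1, h3, h0]
  · have h := slag_loop slagen bezet 1 []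
    rw [hnil] at h
    rw [if_neg h3, h]
    have c1 : (decide (slagen > 3)) = true := by simp; omega
    simp [c1]
    exact ⟨by omega, by rw [if_neg (fun hc => h3 hc.1)]⟩

-- the bisect loop's invariant on a sorted list: it returns the boundary between ≤ t and > t
lemma slagBisect_spec (bases : List Int) (t : Int)
    (hsorted : List.Pairwise (fun a b : Int => a ≤ b) bases) :
    ∀ (n : Nat) (lo hi : Int), (hi - lo).toNat ≤ n →
      0 ≤ lo → lo ≤ hi → hi ≤ (bases.length : Int) →
      (∀ j : Nat, j < bases.length → (j : Int) < lo → bases.getD j 0 ≤ t) →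
      (∀ j : Nat, j < bases.length → hi ≤ (j : Int) → t < bases.getD j 0) →
      0 ≤ slagBisect bases t lo hi ∧ slagBisect bases t lo hi ≤ (bases.length : Int) ∧
      (∀ j : Nat, j < bases.length → (j : Int) < slagBisect bases t lo hi → bases.getD j 0 ≤ t) ∧
      (∀ j : Nat, j < bases.length → slagBisect bases t lo hi ≤ (j : Int) → t < bases.getD j 0) := by
  intro n
  induction n with
  | zero =>
    intro lo hi hfuel h0 hlh hhl hpre hsuf
    have hnl : ¬ lo < hi := by omega
    rw [slagBisect, dif_neg hnl]
    exact ⟨h0, by omega, fun j hj hjlt => hpre j hj hjlt, fun j hj hjge => hsuf j hj (by omega)⟩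
  | succ n ih =>
    intro lo hi hfuel h0 hlh hhl hpre hsuf
    by_cases h : lo < hi
    · rw [slagBisect, dif_pos h]
      have hmid := PySem.Int.floordiv_two_mid_bounds (le_of_lt h)
      have hmidlt : PySem.Int.floordiv (lo + hi) 2 < hi :=
        (PySem.Int.floordiv_lt_iff_lt_mul (by omega)).mpr (by omega)
      set mid := PySem.Int.floordiv (lo + hi) 2 with hmiddef
      have hmlt : mid.toNat < bases.length := by omega
      have hget : PySem.List.pyGetD bases mid 0 = bases.getD mid.toNat 0 := by
        rw [PySem.List.pyGetD_eq_getElem bases 0 (by omega) (by omega)]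
        rw [List.getD_eq_getElem bases 0 hmlt]
      have hmono : ∀ i j : Nat, (hi' : i < bases.length) → (hj' : j < bases.length) → i ≤ j →
          bases.getD i 0 ≤ bases.getD j 0 := by
        intro i j hi' hj' hij
        rw [List.getD_eq_getElem bases 0 hi', List.getD_eq_getElem bases 0 hj']
        rcases Nat.lt_or_ge i j with hlt | hge
        · exact List.pairwise_iff_getElem.mp hsorted i j hi' hj' hlt
        · have : i = j := by omega
          subst this; rfl
      by_cases hle : PySem.List.pyGetD bases mid 0 ≤ t
      · rw [if_pos hle]
        refine ih (mid + 1) hi (by omega) (by omega) (by omega) hhl ?_ hsuf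
        intro j hj hjlt
        have hjm : j ≤ mid.toNat := by omega
        calc bases.getD j 0 ≤ bases.getD mid.toNat 0 := hmono j mid.toNat hj hmlt hjm
          _ ≤ t := by rw [hget] at hle; exact hle
      · rw [if_neg hle]
        refine ih lo mid (by omega) h0 (by omega) (by omega) hpre ?_
        intro j hj hjge
        have hjm : mid.toNat ≤ j := by omega
        calc t < bases.getD mid.toNat 0 := by rw [hget] at hle; omega
          _ ≤ bases.getD j 0 := hmono mid.toNat j hmlt hj hjm
    · rw [slagBisect, dif_neg h]
      exact ⟨h0, by omega, fun j hj hjlt => hpre j hj (by omega), fun j hj hjge => hsuf j hj (by omega)⟩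

-- on a list split at the ≤ t / > t boundary, the two filters are the take and the drop
lemma filter_eq_take_drop (xs : List Int) (t : Int) (k : Nat) (hk : k ≤ xs.length)
    (hpre : ∀ j : Nat, j < xs.length → j < k → xs.getD j 0 ≤ t)
    (hsuf : ∀ j : Nat, j < xs.length → k ≤ j → t < xs.getD j 0) :
    xs.filter (fun b => decide (b ≤ t)) = xs.take k ∧
    xs.filter (fun b => decide (¬ b ≤ t)) = xs.drop k := by
  have htake : ∀ x ∈ xs.take k, x ≤ t := by
    intro x hxm
    obtain ⟨i, hi, hxeq⟩ := List.getElem_of_mem hxm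
    have hilen : i < xs.length := by
      have := List.length_take_le k xs; omega
    rw [List.getElem_take] at hxeq
    have hik : i < k := by simp [List.length_take] at hi; omega
    have := hpre i hilen hik
    rw [List.getD_eq_getElem xs 0 hilen] at this
    rw [← hxeq]; exact this
  have hdrop : ∀ x ∈ xs.drop k, t < x := by
    intro x hxm
    obtain ⟨i, hi, hxeq⟩ := List.getElem_of_mem hxm
    rw [List.getElem_drop] at hxeq
    have hilen : k + i < xs.length := by
      have := List.length_drop (l := xs) (i := k); omega
    have := hsuf (k + i) hilen (by omega)
    rw [List.getD_eq_getElem xs 0 hilen] at this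
    rw [← hxeq]; exact this
  constructor
  · conv_lhs => rw [← List.take_append_drop k xs]
    rw [List.filter_append,
        List.filter_eq_self.mpr (by intro a ha; simpa using htake a ha),
        List.filter_eq_nil_iff.mpr (by intro a ha; simpa using hdrop a ha),
        List.append_nil]
  · conv_lhs => rw [← List.take_append_drop k xs]
    rw [List.filter_append,
        List.filter_eq_nil_iff.mpr (by intro a ha; simpa using htake a ha),
        List.filter_eq_self.mpr (by intro a ha; simpa using hdrop a ha),
        List.nil_append]

-- ===== VERDICT (by name: the statement is the Claim_ definition above) =====
theorem slag_spec : Claim_equal_slag := by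
  intro slagen bezet _
  show slag slagen bezet = slag_alt slagen bezet
  rw [slag_closed]
  set L := (0 :: bezet : List Int) with hL
  set f : Int → Int := fun b => b + slagen with hf
  set bases := PySem.List.sorted L (fun x => x) false with hbases
  set t : Int := 3 - slagen with ht
  have hsorted : List.Pairwise (fun a b : Int => a ≤ b) bases :=
    PySem.List.sorted_pairwise L (fun x => x)
  set r := slagBisect bases t 0 (bases.length : Int) with hr
  have hB : slag_alt slagen bezet
      = ((bases.length : Int) - r,
         ((PySem.List.slice bases none (some r)).filter
            (fun b => decide (b + slagen ≠ 0))).map f) := rfl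
  rw [hB]
  obtain ⟨hr0, hrlen, hpre, hsuf⟩ :=
    slagBisect_spec bases t hsorted bases.length 0 (bases.length : Int) (by omega) (by omega)
      (by omega) (by omega) (fun j hj hjlt => absurd hjlt (by omega))
      (fun j hj hjge => absurd hjge (by omega))
  set k := r.toNat with hk
  obtain ⟨hfle, hfgt⟩ := filter_eq_take_drop bases t k (by omega)
    (fun j hj hjk => hpre j hj (by omega)) (fun j hj hjk => hsuf j hj (by omega))
  have hperm := PySem.List.sorted_perm L (fun x => x) false
  have hlen : bases.length = L.length := hperm.length_eq
  rw [Prod.mk.injEq]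
  constructor
  · -- points: scored suffix length
    rw [List.filter_map, List.length_map]
    have hc : L.filter ((fun p => decide (p > 3)) ∘ f) = L.filter (fun b => decide (¬ b ≤ t)) :=
      List.filter_congr (fun x _ => by simp [hf, ht]; omega)
    rw [hc, ← (hperm.filter _).length_eq, hfgt, List.length_drop]
    omega
  · -- remaining bases: monotone image of the ≤ t prefix, already sorted
    rw [PySem.List.slice_to bases hr0, ← hk, ← hfle]
    rw [List.filter_filter]
    have hcB : bases.filter (fun a => decide (a + slagen ≠ 0) && decide (a ≤ t))
        = bases.filter (fun b => decide (b ≤ t) && decide (b + slagen ≠ 0)) :=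
      List.filter_congr (fun x _ => by rw [Bool.and_comm])
    rw [hcB]
    have hcA : (L.map f).filter (fun p => p ≤ 3 && p ≠ 0)
        = (L.filter (fun b => decide (b ≤ t) && decide (b + slagen ≠ 0))).map f := by
      rw [List.filter_map]
      exact congrArg _ (List.filter_congr (fun x _ => by
        simp only [Function.comp, hf, ht]
        congr 1
        exact decide_eq_decide.mpr (by omega)))
    rw [hcA]
    set c : Int → Bool := fun b => decide (b ≤ t) && decide (b + slagen ≠ 0) with hc
    have hpermB : ((bases.filter c).map f).Perm ((L.filter c).map f) :=
      (hperm.filter c).map f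
    have hsortB : List.Pairwise (fun a b : Int => a ≤ b) ((bases.filter c).map f) :=
      (hsorted.filter c).map f (fun a b hab => by simp [hf]; omega)
    have hsortA : List.Pairwise (fun a b : Int => a ≤ b)
        (PySem.List.sorted ((L.filter c).map f) (fun x => x) false) :=
      PySem.List.sorted_pairwise _ (fun x => x)
    have hpermA : (PySem.List.sorted ((L.filter c).map f) (fun x => x) false).Perm
        ((L.filter c).map f) := PySem.List.sorted_perm _ (fun x => x) false
    exact (hpermA.trans hpermB.symm).eq_of_pairwise
      (fun a b _ _ h1 h2 => le_antisymm h1 h2) hsortA hsortB
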